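-- pv_equiv track=rewrite | github.com/edfink234/Alpha-Zero-Symbolic-Regression | visualize_tree.py | rpn_to_infix
-- ===== SOURCE A (Python) =====
-- def is_operator(token):
--     return token in {"cos", "exp", "sqrt", "sin", "asin", "arcsin", "log", "tanh", "acos", "arccos", "~", "+", "-", "*", "/", "^", "ln", "sech", "conj"}
--
-- def is_unary_operator(token):
--     return token in {"cos", "exp", "sqrt", "sin", "asin", "arcsin", "log", "tanh", "acos", "arccos", "~", "ln", "sech", "conj"}
--
-- def rpn_to_infix(rpn_expression):
--     stack = []
--     if isinstance(rpn_expression, str):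
--         rpn_expression = rpn_expression.split()
--     for token in rpn_expression:
--         if not is_operator(token): #other
--             stack.append(token)
--         elif is_unary_operator(token): #unary operator
--             operand = stack.pop()
--             result = f'{token}({operand})'
--             stack.append(result)
--         else: #binary operator
--             right_operand = stack.pop()
--             left_operand = stack.pop()
--             result = f'({left_operand} {token} {right_operand})'
--             stack.append(result)
--
--     return stack[-1]
-- ===== SOURCE B (Python) =====
-- def rpn_to_infix(rpn_expression):
--     if isinstance(rpn_expression, str):
--         rpn_expression = rpn_expression.split()
--     tokens = rpn_expression
--
--     def parse(i):
--         # returns (expression at index i, index just before that subexpression)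
--         if i < 0:
--             raise IndexError("malformed RPN expression")
--         t = tokens[i]
--         if t in {"~", "cos", "sin", "exp", "sqrt", "asin", "arcsin", "log", "ln",
--                  "tanh", "acos", "arccos", "sech", "conj"}:
--             operand, j = parse(i - 1)
--             return f'{t}({operand})', j
--         if t in {"+", "-", "*", "/", "^"}:
--             right, j = parse(i - 1)
--             left, k = parse(j)
--             return f'({left} {t} {right})', k
--         return t, i - 1
--
--     expr, _ = parse(len(tokens) - 1)
--     return expr
-- ===== Notes on version B (the rewrite author's own statement) =====
-- stated objective: alternative
-- what changed: Replaces A's left-to-right stack machine with a recursive-descent parser that reconstructs the top expression right-to-left from the last token (right operand before left, mirroring A's pop order).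
import Mathlib
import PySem

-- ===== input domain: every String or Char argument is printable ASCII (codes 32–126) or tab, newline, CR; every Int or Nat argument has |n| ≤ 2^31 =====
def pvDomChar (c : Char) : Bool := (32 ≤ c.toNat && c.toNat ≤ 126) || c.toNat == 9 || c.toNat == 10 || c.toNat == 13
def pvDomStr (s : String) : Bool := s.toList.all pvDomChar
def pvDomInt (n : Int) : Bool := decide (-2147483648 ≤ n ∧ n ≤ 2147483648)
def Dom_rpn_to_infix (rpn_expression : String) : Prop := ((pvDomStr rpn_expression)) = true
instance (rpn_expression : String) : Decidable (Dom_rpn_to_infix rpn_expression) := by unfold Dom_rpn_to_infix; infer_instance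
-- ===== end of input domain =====

-- B replaces A's left-to-right stack machine with a recursive-descent parse from the last token
-- (right operand before left, same pop order); objective: alternative algorithm, not claimed faster.

-- ===== PORT A =====
-- is_operator
def isOpA (t : String) : Bool :=
  ["cos", "exp", "sqrt", "sin", "asin", "arcsin", "log", "tanh", "acos", "arccos",
   "~", "+", "-", "*", "/", "^", "ln", "sech", "conj"].contains t

-- is_unary_operator
def isUnA (t : String) : Bool :=
  ["cos", "exp", "sqrt", "sin", "asin", "arcsin", "log", "tanh", "acos", "arccos",
   "~", "ln", "sech", "conj"].contains t

-- one iteration of A's loop; Lean list head = Python stack top (end of list)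
def stepA (stack : List String) (token : String) : List String :=
  if !isOpA token then token :: stack
  else if isUnA token then
    match stack with
    | operand :: rest => (token ++ "(" ++ operand ++ ")") :: rest
    | [] => []          -- Python: stack.pop() raises IndexError; excluded by Pre_
  else
    match stack with
    | r :: l :: rest => ("(" ++ l ++ " " ++ token ++ " " ++ r ++ ")") :: rest
    | _ => []           -- Python: stack.pop() raises IndexError; excluded by Pre_

def rpn_to_infix (rpn_expression : String) : String :=
  match (PySem.Str.split₀ rpn_expression).foldl stepA [] with
  | top :: _ => top
  | [] => ""            -- Python: stack[-1] raises IndexError; excluded by Pre_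

-- ===== PORT B =====
-- B's unary-operator set (B does not use A's is_operator helper)
def isUnB (t : String) : Bool :=
  ["~", "cos", "sin", "exp", "sqrt", "asin", "arcsin", "log", "ln",
   "tanh", "acos", "arccos", "sech", "conj"].contains t

def isBinB (t : String) : Bool := ["+", "-", "*", "/", "^"].contains t

-- B's parse(i): Lean argument i+1 is Python index i; 0 is Python's i < 0 (IndexError → none)
def parseB (tokens : List String) : (i : Nat) → Option (String × {j : Nat // j < i})
  | 0 => none
  | (i+1) =>
    let t := tokens.getD i ""     -- in-range at every reachable call; excluded inputs aside
    if isUnB t then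
      match parseB tokens i with
      | some (operand, ⟨j, hj⟩) => some (t ++ "(" ++ operand ++ ")", ⟨j, by omega⟩)
      | none => none
    else if isBinB t then
      match parseB tokens i with
      | some (r, ⟨j, hj⟩) =>
        match parseB tokens j with
        | some (l, ⟨k, hk⟩) => some ("(" ++ l ++ " " ++ t ++ " " ++ r ++ ")", ⟨k, by omega⟩)
        | none => none
      | none => none
    else some (t, ⟨i, Nat.lt_succ_self i⟩)
termination_by i => i
decreasing_by all_goals omega

def rpn_to_infix_alt (rpn_expression : String) : String :=
  let tokens := PySem.Str.split₀ rpn_expression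
  match parseB tokens tokens.length with
  | some (e, _) => e
  | none => ""          -- Python: IndexError; excluded by Pre_

-- ===== PRECONDITION & SPEC =====
-- Pre_'s own token classification (independent of either port's helpers)
def preIsUn (t : String) : Bool :=
  ["sin", "cos", "sech", "tanh", "asin", "acos", "arcsin", "arccos",
   "exp", "log", "ln", "sqrt", "conj", "~"].contains t

def preIsBin (t : String) : Bool := ["+", "-", "*", "/", "^"].contains t

def arityA (t : String) : Nat := if preIsUn t then 1 else if preIsBin t then 2 else 0

def sumW (p : List String) : Int := (p.map (fun t => 1 - (arityA t : Int))).sum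

-- Pre_ = exactly the inputs on which Python A returns: a nonempty token list whose
-- stack never underflows (each token's arity is covered by the prefix's net pushes).
def Pre_rpn_to_infix (rpn_expression : String) : Prop :=
  PySem.Str.split₀ rpn_expression ≠ [] ∧
  ∀ i : Fin (PySem.Str.split₀ rpn_expression).length,
    (arityA ((PySem.Str.split₀ rpn_expression)[i]) : Int) ≤
      sumW ((PySem.Str.split₀ rpn_expression).take i.1)

instance (rpn_expression : String) : Decidable (Pre_rpn_to_infix rpn_expression) := by
  unfold Pre_rpn_to_infix; infer_instance

def pvWitness_rpn_to_infix : String := "x y + sin"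

def Spec_rpn_to_infix (rpn_expression : String) (out : String) : Prop := out = rpn_to_infix_alt rpn_expression
instance (rpn_expression : String) (out : String) : Decidable (Spec_rpn_to_infix rpn_expression out) := by unfold Spec_rpn_to_infix; infer_instance

-- ===== CLAIM (what is proved, stated in full; the proofs are below) =====
def Claim_equal_rpn_to_infix : Prop := ∀ (rpn_expression : String), Dom_rpn_to_infix rpn_expression → Pre_rpn_to_infix rpn_expression → Spec_rpn_to_infix rpn_expression (rpn_to_infix rpn_expression)

-- ===== LEMMAS AND PROOFS =====

-- a complete RPN segment and the infix string it denotes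
inductive CompSeg : List String → String → Prop
  | leaf (t : String) : isOpA t = false → CompSeg [t] t
  | un (t : String) (seg : List String) (e : String) :
      isOpA t = true → isUnA t = true → CompSeg seg e → CompSeg (seg ++ [t]) (t ++ "(" ++ e ++ ")")
  | bin (t : String) (s1 s2 : List String) (l r : String) :
      isOpA t = true → isUnA t = false → CompSeg s1 l → CompSeg s2 r →
      CompSeg (s1 ++ s2 ++ [t]) ("(" ++ l ++ " " ++ t ++ " " ++ r ++ ")")

lemma unB_eq (t : String) : isUnB t = isUnA t := by
  simp only [isUnB, isUnA, List.contains_eq_mem, decide_eq_decide, List.mem_cons,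
    List.not_mem_nil]
  tauto

lemma preUn_eq (t : String) : preIsUn t = isUnA t := by
  simp only [preIsUn, isUnA, List.contains_eq_mem, decide_eq_decide, List.mem_cons,
    List.not_mem_nil]
  tauto

lemma preBin_eq (t : String) : preIsBin t = isBinB t := rfl

lemma un_op {t : String} (h : isUnA t = true) : isOpA t = true := by
  simp [isUnA] at h
  rcases h with h|h|h|h|h|h|h|h|h|h|h|h|h|h <;> subst h <;> decide

lemma bin_op {t : String} (h : isBinB t = true) : isOpA t = true := by
  simp [isBinB] at h
  rcases h with h|h|h|h|h <;> subst h <;> decide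

lemma op_split {t : String} (h : isOpA t = true) (hu : isUnA t = false) : isBinB t = true := by
  simp [isOpA] at h
  rcases h with h|h|h|h|h|h|h|h|h|h|h|h|h|h|h|h|h|h|h <;> subst h <;>
    first
      | decide
      | (exfalso; revert hu; decide)

lemma not_op_un {t : String} (h : isOpA t = false) : isUnA t = false := by
  by_contra hc
  exact absurd (un_op (by simpa using hc)) (by simp [h])

lemma not_op_bin {t : String} (h : isOpA t = false) : isBinB t = false := by
  by_contra hc
  exact absurd (bin_op (by simpa using hc)) (by simp [h])

lemma comp_nonempty {seg : List String} {e : String} (h : CompSeg seg e) : 0 < seg.length := by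
  cases h <;> simp

lemma sumW_append (a b : List String) : sumW (a ++ b) = sumW a + sumW b := by
  simp [sumW]

lemma comp_sumW {seg : List String} {e : String} (h : CompSeg seg e) : sumW seg = 1 := by
  induction h with
  | leaf t h => simp [sumW, arityA, preUn_eq, preBin_eq, not_op_un h, not_op_bin h]
  | un t seg e ho hu _ ih => rw [sumW_append, ih]; simp [sumW, arityA, preUn_eq, hu]
  | bin t s1 s2 l r ho hu _ _ ih1 ih2 =>
      rw [sumW_append, sumW_append, ih1, ih2]
      simp [sumW, arityA, preUn_eq, preBin_eq, hu, op_split ho hu]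

-- the stack after processing p is the values of a segmentation of p
inductive Stacked : List String → List String → Prop
  | nil : Stacked [] []
  | cons (p seg : List String) (e : String) (S : List String) :
      Stacked p S → CompSeg seg e → Stacked (p ++ seg) (e :: S)

lemma stacked_sumW {p S : List String} (h : Stacked p S) : sumW p = S.length := by
  induction h with
  | nil => simp [sumW]
  | cons p seg e S _ hc ih => rw [sumW_append, ih, comp_sumW hc]; simp

lemma fwd : ∀ (rest p S : List String), Stacked p S →
    (∀ i : Fin rest.length, (arityA rest[i] : Int) ≤ sumW (p ++ rest.take i.1)) →
    Stacked (p ++ rest) (rest.foldl stepA S) := by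
  intro rest
  induction rest with
  | nil => intro p S h _; simpa using h
  | cons t rest ih =>
    intro p S hst hcond
    have h0 : (arityA t : Int) ≤ sumW p := by
      have := hcond ⟨0, by simp⟩; simpa using this
    have hlen : sumW p = S.length := stacked_sumW hst
    have hstep : ∃ S', stepA S t = S' ∧ Stacked (p ++ [t]) S' := by
      by_cases hop : isOpA t = true
      · by_cases hun : isUnA t = true
        · have h1 : 1 ≤ (S.length : Int) := by
            have : (arityA t : Int) = 1 := by simp [arityA, preUn_eq, hun]
            omega
          cases hst with
          | nil => simp at h1
          | cons p' seg e S' hst' hc =>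
            refine ⟨(t ++ "(" ++ e ++ ")") :: S', by simp [stepA, hop, hun], ?_⟩
            have := Stacked.cons p' (seg ++ [t]) _ S' hst' (CompSeg.un t seg e hop hun hc)
            simpa [List.append_assoc] using this
        · have hun' : isUnA t = false := by simpa using hun
          have h2 : 2 ≤ (S.length : Int) := by
            have : (arityA t : Int) = 2 := by
              simp [arityA, preUn_eq, preBin_eq, hun', op_split hop hun']
            omega
          cases hst with
          | nil => simp at h2
          | cons p' seg2 r S' hst' hc2 =>
            cases hst' with
            | nil => simp at h2
            | cons p'' seg1 l S'' hst'' hc1 =>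
              refine ⟨("(" ++ l ++ " " ++ t ++ " " ++ r ++ ")") :: S'',
                      by simp [stepA, hop, hun'], ?_⟩
              have := Stacked.cons p'' (seg1 ++ seg2 ++ [t]) _ S'' hst''
                (CompSeg.bin t seg1 seg2 l r hop hun' hc1 hc2)
              simpa [List.append_assoc] using this
      · have hop' : isOpA t = false := by simpa using hop
        exact ⟨t :: S, by simp [stepA, hop'], Stacked.cons p [t] t S hst (CompSeg.leaf t hop')⟩
    obtain ⟨S', hS', hst'⟩ := hstep
    have hres := ih (p ++ [t]) S' hst' ?_
    · simpa [List.append_assoc, hS'] using hres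
    · intro ⟨i, hi⟩
      have := hcond ⟨i + 1, by simpa using Nat.succ_lt_succ hi⟩
      simpa [List.take_succ_cons, List.append_assoc] using this

lemma getD_app_last (p : List String) (t : String) :
    (p ++ [t]).getD p.length "" = t := by
  rw [List.getD_eq_getElem?_getD, List.getElem?_append_right le_rfl]
  simp

lemma getD_app_left (p q : List String) (k : Nat) (hk : k < p.length) :
    (p ++ q).getD k "" = p.getD k "" := by
  rw [List.getD_eq_getElem?_getD, List.getD_eq_getElem?_getD, List.getElem?_append_left hk]

lemma getD_app (p q : List String) (k : Nat) (_hk : k < q.length) :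
    (p ++ q).getD (p.length + k) "" = q.getD k "" := by
  rw [List.getD_eq_getElem?_getD, List.getD_eq_getElem?_getD,
      List.getElem?_append_right (by omega)]
  simp

-- backward: parseB reads exactly a complete segment ending at its index
lemma bk {seg : List String} {e : String} (h : CompSeg seg e) :
    ∀ (tokens : List String) (m n : Nat), n = m + seg.length →
      (∀ k, k < seg.length → tokens.getD (m + k) "" = seg.getD k "") →
      ∀ (hm : m < n), parseB tokens n = some (e, ⟨m, hm⟩) := by
  induction h with
  | leaf t h =>
    intro tokens m n hn hagree hm
    subst hn
    have ht : tokens.getD m "" = t := by simpa using hagree 0 (by simp)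
    have hun : isUnA t = false := not_op_un h
    have hbin : isBinB t = false := not_op_bin h
    simp only [List.getD] at ht
    simp [parseB, unB_eq, ht, hun, hbin]
  | un t seg e ho hu hcseg ih =>
    intro tokens m n hn hagree hm
    have hn' : n = (m + seg.length) + 1 := by simp at hn; omega
    subst hn'
    have ht : tokens.getD (m + seg.length) "" = t := by
      rw [hagree seg.length (by simp), getD_app_last seg t]
    have hrec : parseB tokens (m + seg.length) =
        some (e, ⟨m, by have := comp_nonempty hcseg; omega⟩) := by
      apply ih tokens m _ rfl _ _
      intro k hk
      rw [hagree k (by simp; omega), getD_app_left seg [t] k hk]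
    simp only [List.getD] at ht
    simp [parseB, unB_eq, ht, hu, hrec]
  | bin t s1 s2 l r ho hu hc1 hc2 ih1 ih2 =>
    intro tokens m n hn hagree hm
    have hn' : n = ((m + s1.length) + s2.length) + 1 := by simp at hn; omega
    subst hn'
    have hb : isBinB t = true := op_split ho hu
    have ht : tokens.getD (m + s1.length + s2.length) "" = t := by
      have := hagree (s1.length + s2.length) (by simp)
      rw [show m + (s1.length + s2.length) = m + s1.length + s2.length by omega] at this
      rw [this, show s1.length + s2.length = (s1 ++ s2).length by simp,
          getD_app_last (s1 ++ s2) t]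
    have hrec2 : parseB tokens ((m + s1.length) + s2.length) =
        some (r, ⟨m + s1.length, by have := comp_nonempty hc2; omega⟩) := by
      apply ih2 tokens (m + s1.length) _ rfl _ _
      intro k hk
      have := hagree (s1.length + k) (by simp; omega)
      rw [show m + s1.length + k = m + (s1.length + k) by omega, this,
          getD_app_left (s1 ++ s2) [t] (s1.length + k) (by simp; omega),
          getD_app s1 s2 k hk]
    have hrec1 : parseB tokens (m + s1.length) =
        some (l, ⟨m, by have := comp_nonempty hc1; omega⟩) := by
      apply ih1 tokens m _ rfl _ _
      intro k hk
      rw [hagree k (by simp; omega),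
          getD_app_left (s1 ++ s2) [t] k (by simp; omega),
          getD_app_left s1 s2 k hk]
    simp only [List.getD] at ht
    simp [parseB, unB_eq, ht, hu, hb, hrec2, hrec1]

lemma stacked_nil {p : List String} (h : Stacked p []) : p = [] := by
  cases h; rfl

lemma stacked_cons_inv {p : List String} {e : String} {S : List String}
    (h : Stacked p (e :: S)) :
    ∃ p' seg, p = p' ++ seg ∧ Stacked p' S ∧ CompSeg seg e := by
  cases h with
  | cons p' seg e S hst hc => exact ⟨p', seg, rfl, hst, hc⟩

-- ===== VERDICT (by name: the statement is the Claim_ definition above) =====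
theorem rpn_to_infix_spec : Claim_equal_rpn_to_infix := by
  intro s _ hpre
  obtain ⟨hne, hcond⟩ := hpre
  unfold Spec_rpn_to_infix rpn_to_infix rpn_to_infix_alt
  have hst : Stacked (PySem.Str.split₀ s) ((PySem.Str.split₀ s).foldl stepA []) := by
    have := fwd (PySem.Str.split₀ s) [] [] Stacked.nil (by simpa using hcond)
    simpa using this
  rcases hS : (PySem.Str.split₀ s).foldl stepA [] with _ | ⟨top, S₂⟩
  · rw [hS] at hst
    exact absurd (stacked_nil hst) hne
  · rw [hS] at hst
    obtain ⟨p', seg, hps, hst', hc⟩ := stacked_cons_inv hst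
    have hagree : ∀ k, k < seg.length →
        (PySem.Str.split₀ s).getD (p'.length + k) "" = seg.getD k "" := by
      intro k hk; rw [hps]; exact getD_app p' seg k hk
    have hlen : (PySem.Str.split₀ s).length = p'.length + seg.length := by
      rw [hps]; simp
    have hp := bk hc (PySem.Str.split₀ s) p'.length _ hlen hagree
      (by rw [hlen]; have := comp_nonempty hc; omega)
    simp [hp]
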